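-- pv_equiv track=rewrite | github.com/renatskosarev/GrokkingAlgorithms | Yandex Trainings — One/lesson01/G_recursion.py | solve
-- ===== SOURCE A (Python) =====
-- def solve(N, K, M):
--     if K > N or M > K:
--         return 0
--
--     # базовый случай - не хватает сплава на изготовление заготовок
--     if (N // K == 0):
--         return 0
--
--     # рекурсивный случай
--     excess = N % K  # избыток
--     preform_count = N // K
--
--     detail_count = (K // M) * preform_count
--     excess += (K % M) * preform_count
--     detail_count += solve(excess, K, M)
--     return detail_count
-- ===== SOURCE B (Python) =====
-- def solve(N, K, M):
--     if M > K:
--         return 0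
--     total = 0
--     while N >= K:
--         q = N // K
--         total += (K // M) * q
--         N = N % K + (K % M) * q
--     return total
-- ===== Notes on version B (the rewrite author's own statement) =====
-- stated objective: simpler
-- what changed: Replaced the tail recursion with an explicit while-loop over an accumulator (K and M are invariant), hoisting the M > K check out of the iteration; no recursion, no per-call guard re-evaluation.
-- outside the precondition, e.g. on solve(0, -2, -3): A returns 0, B does not finish within the time limit
import Mathlib
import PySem

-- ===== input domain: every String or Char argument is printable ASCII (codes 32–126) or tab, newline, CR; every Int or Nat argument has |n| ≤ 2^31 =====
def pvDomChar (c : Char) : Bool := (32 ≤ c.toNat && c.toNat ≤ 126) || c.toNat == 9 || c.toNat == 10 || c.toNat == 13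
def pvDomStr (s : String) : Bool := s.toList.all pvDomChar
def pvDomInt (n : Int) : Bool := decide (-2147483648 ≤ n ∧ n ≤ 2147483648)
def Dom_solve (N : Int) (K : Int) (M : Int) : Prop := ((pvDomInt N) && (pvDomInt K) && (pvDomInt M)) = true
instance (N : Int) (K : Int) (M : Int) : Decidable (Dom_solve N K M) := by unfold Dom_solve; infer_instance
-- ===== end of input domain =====

-- B replaces A's tail recursion by an explicit accumulator loop (simpler, no recursion); return-value equivalence proved on Pre_solve.

-- ===== PORT A =====
-- A's recursion, with a fuel counter only to make it total in Lean; on every input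
-- admitted by Pre_solve the fuel N.toNat + 1 is sufficient (each recursive call
-- strictly decreases a nonnegative first argument), so the 0-on-exhaustion branch
-- is never reached there.
def solveFuel (fuel : Nat) (N : Int) (K : Int) (M : Int) : Int :=
  match fuel with
  | 0 => 0
  | f + 1 =>
    if K > N ∨ M > K then 0
    else if PySem.Int.floordiv N K = 0 then 0
    else
      let excess := PySem.Int.mod N K
      let preform_count := PySem.Int.floordiv N K
      let detail_count := PySem.Int.floordiv K M * preform_count
      let excess := excess + PySem.Int.mod K M * preform_count
      detail_count + solveFuel f excess K M

def solve (N : Int) (K : Int) (M : Int) : Int := solveFuel (N.toNat + 1) N K M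

-- ===== PORT B =====
-- B's while-loop, same fuel convention as A's port (sufficient on Pre_solve).
def loopB (fuel : Nat) (N : Int) (K : Int) (M : Int) (total : Int) : Int :=
  match fuel with
  | 0 => total
  | f + 1 =>
    if N ≥ K then
      let q := PySem.Int.floordiv N K
      loopB f (PySem.Int.mod N K + PySem.Int.mod K M * q) K M
        (total + PySem.Int.floordiv K M * q)
    else total

def solve_alt (N : Int) (K : Int) (M : Int) : Int :=
  if M > K then 0 else loopB (N.toNat + 1) N K M 0

-- ===== PRECONDITION & SPEC =====
-- Pre_ excludes (i) M = 0 with K ≤ N ≤ … where A (and B) raise ZeroDivisionError,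
-- and (ii) K ≤ 0 with M ≤ K and N ≥ K, where A either recurses forever or returns 0
-- through guards that B's loop formulation does not terminate on.
def Pre_solve (N : Int) (K : Int) (M : Int) : Prop :=
  N < K ∨ M > K ∨ (1 ≤ K ∧ M ≠ 0)
instance (N : Int) (K : Int) (M : Int) : Decidable (Pre_solve N K M) := by unfold Pre_solve; infer_instance

def pvWitness_solve : Int × Int × Int := (10, 3, 2)

def Spec_solve (N : Int) (K : Int) (M : Int) (out : Int) : Prop := out = solve_alt N K M
instance (N : Int) (K : Int) (M : Int) (out : Int) : Decidable (Spec_solve N K M out) := by unfold Spec_solve; infer_instance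

-- ===== CLAIM (what is proved, stated in full; the proofs are below) =====
def Claim_equal_solve : Prop := ∀ (N : Int) (K : Int) (M : Int), Dom_solve N K M → Pre_solve N K M → Spec_solve N K M (solve N K M)

-- ===== LEMMAS AND PROOFS =====

-- With a positive K, A's two stopping guards together are exactly "N < K".
lemma floordiv_pos_of_le (N K : Int) (hK : 1 ≤ K) (h : K ≤ N) :
    PySem.Int.floordiv N K ≠ 0 := by
  have hmul := PySem.Int.floordiv_mul_add_mod N K
  have hr0 : 0 ≤ PySem.Int.mod N K := PySem.Int.mod_nonneg (a := N) (by omega)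
  have hrK : PySem.Int.mod N K < K := PySem.Int.mod_lt (a := N) (by omega)
  intro h0
  rw [h0] at hmul
  omega

-- The loop with accumulator computes total + A's recursion, for K ≥ 1 and M ≤ K.
lemma loopB_eq_solveFuel (K M : Int) (hK : 1 ≤ K) (hM : ¬ M > K) :
    ∀ (f : Nat) (N total : Int), loopB f N K M total = total + solveFuel f N K M := by
  intro f
  induction f with
  | zero => intro N total; simp [loopB, solveFuel]
  | succ f ih =>
    intro N total
    by_cases h : N ≥ K
    · have hg : ¬ (K > N ∨ M > K) := by omega
      have hq := floordiv_pos_of_le N K hK (by omega)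
      simp only [loopB, solveFuel, if_pos h, if_neg hg, if_neg hq, ih]
      ring
    · have hg : K > N ∨ M > K := by omega
      simp only [loopB, solveFuel, if_neg h, if_pos hg]
      ring

-- ===== VERDICT (by name: the statement is the Claim_ definition above) =====
theorem solve_spec : Claim_equal_solve := by
  intro N K M _ hPre
  unfold Spec_solve solve solve_alt
  by_cases hM : M > K
  · simp [solveFuel, hM]
  · rw [if_neg hM]
    by_cases hK : 1 ≤ K
    · rw [loopB_eq_solveFuel K M hK hM]
      ring
    · -- K ≤ 0 and M ≤ K, so Pre_ forces N < K: both sides stop immediately.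
      have hNK : N < K := by
        unfold Pre_solve at hPre
        omega
      have hg : K > N ∨ M > K := Or.inl (by omega)
      simp [solveFuel, loopB, hNK, not_le.mpr hNK]
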